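-- pv_equiv track=rewrite | github.com/uchicago-cmsc14100-win-2023/coursework-upstream | pp/bac/recursion.py | mystery3
-- ===== SOURCE A (Python) =====
-- def mystery3(s, c, d, x):
--     if s == "":
--         return x
--     elif s[0] == c:
--         return mystery3(s[1:], c, d, x+1)
--     elif s[0] == d:
--         if x > 0:
--             return mystery3(s[1:], c, d, x-1)
--         return -1
--     else:
--         return mystery3(s[1:], c, d, x)
-- ===== SOURCE B (Python) =====
-- def mystery3(s, c, d, x):
--     bal = x
--     for ch in s:
--         if ch == c:
--             bal += 1
--         elif ch == d:
--             if bal <= 0: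
--                 return -1
--             bal -= 1
--     return bal
-- ===== Notes on version B (the rewrite author's own statement) =====
-- stated objective: faster
-- what changed: Replaced the recursion that re-slices the string at every step with a single iterative pass over the characters carrying the running balance (early return on underflow).
import Mathlib
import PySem

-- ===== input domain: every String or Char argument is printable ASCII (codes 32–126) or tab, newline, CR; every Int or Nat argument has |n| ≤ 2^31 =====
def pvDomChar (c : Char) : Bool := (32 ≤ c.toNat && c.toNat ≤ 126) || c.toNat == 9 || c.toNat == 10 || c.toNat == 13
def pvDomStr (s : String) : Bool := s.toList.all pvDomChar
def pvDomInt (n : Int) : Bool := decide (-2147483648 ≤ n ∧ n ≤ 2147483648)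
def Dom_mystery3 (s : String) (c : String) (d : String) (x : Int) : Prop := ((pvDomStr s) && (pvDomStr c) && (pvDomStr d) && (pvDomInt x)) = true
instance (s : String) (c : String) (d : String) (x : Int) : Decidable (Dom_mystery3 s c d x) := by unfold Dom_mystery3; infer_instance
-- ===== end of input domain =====

-- B replaces A's recursion with re-slicing by a single iterative pass (asymptotically faster).

-- ===== PORT A =====
-- A's structural recursion on the string: s == "" / s[0] == c / s[0] == d / else,
-- recursing on s[1:] (here: the tail of the character list).
def mystery3Go (c : String) (d : String) : List Char → Int → Int
  | [], x => x
  | h :: t, x =>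
    if String.ofList [h] = c then mystery3Go c d t (x + 1)
    else if String.ofList [h] = d then
      (if x > 0 then mystery3Go c d t (x - 1) else -1)
    else mystery3Go c d t x

def mystery3 (s : String) (c : String) (d : String) (x : Int) : Int :=
  mystery3Go c d s.toList x

-- ===== PORT B =====
-- B's loop body: the running state is 'still looping with balance bal' (.ok bal)
-- or 'already returned r' (.error r, B's early `return -1`).
def mystery3AltStep (c : String) (d : String) (st : Except Int Int) (ch : Char) : Except Int Int :=
  match st with
  | .error r => .error r
  | .ok bal =>
    if String.ofList [ch] = c then .ok (bal + 1)
    else if String.ofList [ch] = d then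
      (if bal ≤ 0 then .error (-1) else .ok (bal - 1))
    else .ok bal

def mystery3_alt (s : String) (c : String) (d : String) (x : Int) : Int :=
  match s.toList.foldl (mystery3AltStep c d) (.ok x) with
  | .ok bal => bal
  | .error r => r

-- ===== PRECONDITION & SPEC =====
def Spec_mystery3 (s : String) (c : String) (d : String) (x : Int) (out : Int) : Prop := out = mystery3_alt s c d x
instance (s : String) (c : String) (d : String) (x : Int) (out : Int) : Decidable (Spec_mystery3 s c d x out) := by unfold Spec_mystery3; infer_instance

-- ===== CLAIM (what is proved, stated in full; the proofs are below) =====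
def Claim_equal_mystery3 : Prop := ∀ (s : String) (c : String) (d : String) (x : Int), Dom_mystery3 s c d x → Spec_mystery3 s c d x (mystery3 s c d x)

-- ===== LEMMAS AND PROOFS =====
theorem foldl_step_error (c d : String) (l : List Char) (r : Int) :
    l.foldl (mystery3AltStep c d) (.error r) = .error r := by
  induction l with
  | nil => rfl
  | cons h t ih => simpa [mystery3AltStep] using ih

theorem go_eq_fold (c d : String) (l : List Char) (x : Int) :
    mystery3Go c d l x =
      (match l.foldl (mystery3AltStep c d) (.ok x) with
       | .ok bal => bal
       | .error r => r) := by
  induction l generalizing x with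
  | nil => rfl
  | cons h t ih =>
    by_cases hc : String.ofList [h] = c
    · simpa [mystery3Go, mystery3AltStep, hc] using ih (x + 1)
    · by_cases hd : String.ofList [h] = d
      · have hdc : ¬ (d = c) := by rw [← hd]; exact hc
        by_cases hx : x > 0
        · have hx' : ¬ x ≤ 0 := by omega
          simpa [mystery3Go, mystery3AltStep, hc, hd, hdc, hx, hx'] using ih (x - 1)
        · have hx' : x ≤ 0 := by omega
          simp [mystery3Go, mystery3AltStep, hd, hdc, hx, hx', foldl_step_error]
      · simpa [mystery3Go, mystery3AltStep, hc, hd] using ih x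

-- ===== VERDICT (by name: the statement is the Claim_ definition above) =====
theorem mystery3_spec : Claim_equal_mystery3 := by
  intro s c d x _
  unfold Spec_mystery3 mystery3 mystery3_alt
  exact go_eq_fold c d s.toList x
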